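-- pv_equiv track=rewrite | github.com/dgsdhsd/social-conformity | 代码文件/代码优化/5_时间序列图_目标定向AOI_一致性行为.py | find_c_segments
-- ===== SOURCE A (Python) =====
-- def find_c_segments(sequence):
--     """
--     查找序列中连续包含字符'C'的段落，返回起止索引元组列表
--     """
--     segments = []
--     start = None
--     for i, val in enumerate(sequence):
--         if 'C' in val:
--             if start is None:
--                 start = i
--         else:
--             if start is not None:
--                 segments.append((start, i - 1))
--                 start = None
--     if start is not None:
--         segments.append((start, len(sequence) - 1))
--     return segments
-- ===== SOURCE B (Python) =====
-- def find_c_segments(sequence):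
--     """
--     Run-grouping re-implementation: precompute a boolean mask, then scan it
--     run by run, emitting (start, end) for each True run.
--     """
--     flags = ['C' in v for v in sequence]
--     segments = []
--     pos = 0
--     n = len(flags)
--     while pos < n:
--         b = flags[pos]
--         end = pos + 1
--         while end < n and flags[end] == b:
--             end += 1
--         if b:
--             segments.append((pos, end - 1))
--         pos = end
--     return segments
-- ===== Notes on version B (the rewrite author's own statement) =====
-- stated objective: alternative
-- what changed: Replaced the open-segment state machine (start=None sentinel carried through the loop plus a post-loop flush) with a two-phase run-grouping scan: first build a boolean mask, then consume it run by run, emitting one segment per True run.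
import Mathlib
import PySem

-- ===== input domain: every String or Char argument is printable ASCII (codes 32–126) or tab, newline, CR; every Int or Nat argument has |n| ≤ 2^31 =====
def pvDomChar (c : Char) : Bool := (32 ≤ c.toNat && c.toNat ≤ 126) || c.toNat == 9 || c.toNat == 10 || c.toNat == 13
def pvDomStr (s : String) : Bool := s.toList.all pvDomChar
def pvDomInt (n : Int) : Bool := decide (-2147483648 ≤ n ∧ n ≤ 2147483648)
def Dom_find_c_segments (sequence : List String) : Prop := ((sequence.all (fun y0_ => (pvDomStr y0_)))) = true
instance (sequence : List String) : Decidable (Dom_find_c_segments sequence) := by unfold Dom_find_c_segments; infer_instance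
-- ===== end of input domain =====

-- B replaces A's start=None state machine by a two-phase run-grouping scan over a
-- precomputed boolean mask (objective: alternative, same O(n) cost).

-- ===== PORT A =====
-- loop body of A: state = (segments, start); one step per (i, val) of enumerate(sequence)
def aStep (st : List (Int × Int) × Option Int) (iv : Int × String) : List (Int × Int) × Option Int :=
  if PySem.Str.isIn "C" iv.2 then
    match st.2 with
    | none => (st.1, some iv.1)
    | some s => (st.1, some s)
  else
    match st.2 with
    | some s => (st.1 ++ [(s, iv.1 - 1)], none)
    | none => (st.1, none)

def find_c_segments (sequence : List String) : List (Int × Int) :=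
  let r := (PySem.List.enumerate sequence 0).foldl aStep ([], none)
  match r.2 with
  | some s => r.1 ++ [(s, (sequence.length : Int) - 1)]
  | none => r.1

-- ===== PORT B =====
-- the outer while loop of B: consume one run of equal flags per call
def bRuns : List Bool → Int → List (Int × Int)
  | [], _ => []
  | b :: rest, pos =>
      let k := (rest.takeWhile (fun x => x == b)).length
      let tail := bRuns (rest.dropWhile (fun x => x == b)) (pos + 1 + k)
      if b then (pos, pos + k) :: tail else tail
termination_by flags _ => flags.length
decreasing_by
  simp only [List.length_cons]
  exact Nat.lt_succ_of_le (List.length_dropWhile_le _ _)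

def find_c_segments_alt (sequence : List String) : List (Int × Int) :=
  bRuns (sequence.map (fun v => PySem.Str.isIn "C" v)) 0

-- ===== PRECONDITION & SPEC =====
def Spec_find_c_segments (sequence : List String) (out : List (Int × Int)) : Prop := out = find_c_segments_alt sequence
instance (sequence : List String) (out : List (Int × Int)) : Decidable (Spec_find_c_segments sequence out) := by unfold Spec_find_c_segments; infer_instance

-- ===== CLAIM (what is proved, stated in full; the proofs are below) =====
def Claim_equal_find_c_segments : Prop := ∀ (sequence : List String), Dom_find_c_segments sequence → Spec_find_c_segments sequence (find_c_segments sequence)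

-- ===== LEMMAS AND PROOFS =====

-- A's loop, restated on the boolean mask alone (the step only inspects the flag)
def aCore : List Bool → Int → (List (Int × Int) × Option Int) → (List (Int × Int) × Option Int)
  | [], _, st => st
  | b :: rest, i, st =>
      aCore rest (i + 1)
        (if b then
          match st.2 with
          | none => (st.1, some i)
          | some s => (st.1, some s)
        else
          match st.2 with
          | some s => (st.1 ++ [(s, i - 1)], none)
          | none => (st.1, none))

-- A's loop + final flush, on the mask, with a general starting index
def finA (flags : List Bool) (i : Int) (st : List (Int × Int) × Option Int) : List (Int × Int) :=
  match aCore flags i st with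
  | (segs, some s) => segs ++ [(s, i + (flags.length : Int) - 1)]
  | (segs, none) => segs

lemma foldl_aStep_eq_aCore (seq : List String) (i : Int) (st : List (Int × Int) × Option Int) :
    (PySem.List.enumerate seq i).foldl aStep st
      = aCore (seq.map (fun v => PySem.Str.isIn "C" v)) i st := by
  induction seq generalizing i st with
  | nil => simp [PySem.List.enumerate_nil, aCore]
  | cons v rest ih =>
      simp only [PySem.List.enumerate_cons, List.foldl_cons, List.map_cons, aCore]
      rw [ih]
      rcases st with ⟨segs, start⟩
      by_cases h : PySem.Str.isIn "C" v <;> cases start <;> simp [aStep]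

lemma bRuns_false_cons (rest : List Bool) (i : Int) :
    bRuns (false :: rest) i = bRuns rest (i + 1) := by
  cases rest with
  | nil => simp [bRuns]
  | cons b2 r2 =>
      cases b2 with
      | true => simp [bRuns]
      | false =>
          simp only [bRuns, List.takeWhile_cons, List.dropWhile_cons, beq_self_eq_true,
            if_true, List.length_cons, Bool.false_eq_true, if_false]
          congr 1
          push_cast
          ring

-- unfolding finA one step, with the end index rewritten for the shorter list
lemma finA_cons (b : Bool) (rest : List Bool) (i : Int) (st : List (Int × Int) × Option Int) :
    finA (b :: rest) i st
      = finA rest (i + 1)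
          (if b then
            match st.2 with
            | none => (st.1, some i)
            | some s => (st.1, some s)
          else
            match st.2 with
            | some s => (st.1 ++ [(s, i - 1)], none)
            | none => (st.1, none)) := by
  simp only [finA, aCore]
  rcases h : aCore rest (i + 1) (if b then
            match st.2 with
            | none => (st.1, some i)
            | some s => (st.1, some s)
          else
            match st.2 with
            | some s => (st.1 ++ [(s, i - 1)], none)
            | none => (st.1, none)) with ⟨segs', st'⟩
  cases st' with
  | none => simp
  | some s' =>
      simp only [List.length_cons]
      congr 2
      push_cast
      ring_nf

-- main invariant: A's state machine equals B's run grouping, both for a closed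
-- state (none) and for an open segment (some s)
lemma finA_eq_bRuns (flags : List Bool) :
    (∀ (i : Int) (segs : List (Int × Int)),
        finA flags i (segs, none) = segs ++ bRuns flags i) ∧
    (∀ (i : Int) (segs : List (Int × Int)) (s : Int),
        finA flags i (segs, some s)
          = segs ++ (s, i + ((flags.takeWhile (fun x => x)).length : Int) - 1)
              :: bRuns (flags.dropWhile (fun x => x))
                  (i + (flags.takeWhile (fun x => x)).length)) := by
  induction flags with
  | nil =>
      constructor
      · intro i segs; simp [finA, aCore, bRuns]
      · intro i segs s; simp [finA, aCore, bRuns]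
  | cons b rest ih =>
      obtain ⟨ihP, ihQ⟩ := ih
      cases b with
      | true =>
          constructor
          · intro i segs
            rw [finA_cons]
            simp only [if_true]
            rw [ihQ]
            simp only [bRuns, beq_true, if_true]
            have e : i + 1 + ((rest.takeWhile (fun x => x)).length : Int) - 1
                = i + ((rest.takeWhile (fun x => x)).length : Int) := by ring
            rw [e]
          · intro i segs s
            rw [finA_cons]
            simp only [if_true]
            rw [ihQ]
            simp only [List.takeWhile_cons, List.dropWhile_cons, if_true, List.length_cons]
            push_cast
            have e1 : i + 1 + ((rest.takeWhile (fun x => x)).length : Int) - 1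
                = i + (((rest.takeWhile (fun x => x)).length : Int) + 1) - 1 := by ring
            have e2 : i + 1 + ((rest.takeWhile (fun x => x)).length : Int)
                = i + (((rest.takeWhile (fun x => x)).length : Int) + 1) := by ring
            rw [e1, e2]
      | false =>
          constructor
          · intro i segs
            rw [finA_cons]
            simp only [Bool.false_eq_true, if_false]
            rw [ihP, bRuns_false_cons]
          · intro i segs s
            rw [finA_cons]
            simp only [Bool.false_eq_true, if_false]
            rw [ihP]
            simp only [List.takeWhile_cons, List.dropWhile_cons, Bool.false_eq_true, if_false,
              List.length_nil, Nat.cast_zero, add_zero]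
            rw [bRuns_false_cons]
            simp

-- ===== VERDICT (by name: the statement is the Claim_ definition above) =====
theorem find_c_segments_spec : Claim_equal_find_c_segments := by
  intro sequence _
  unfold Spec_find_c_segments find_c_segments find_c_segments_alt
  have hlen : ((sequence.map (fun v => PySem.Str.isIn "C" v)).length : Int)
      = (sequence.length : Int) := by simp
  have h := (finA_eq_bRuns (sequence.map (fun v => PySem.Str.isIn "C" v))).1 0 []
  simp only [finA, foldl_aStep_eq_aCore] at *
  rcases hr : aCore (sequence.map (fun v => PySem.Str.isIn "C" v)) 0 ([], none) with ⟨segs, st⟩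
  rw [hr] at h
  cases st with
  | none => simpa using h
  | some s =>
      simp only [List.nil_append] at h ⊢
      rw [← h]
      congr 2
      simp
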